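-- pv_equiv track=rewrite | github.com/jackchienchen/StanCode_SC001 | Assignment3/similarity.py | match_process
-- ===== SOURCE A (Python) =====
-- def match_process(long, short):
--     highest_score = 0
--     score = 0
--     best_match = ''
--     for i in range(len(long)-len(short)+1):
--         for j in range(len(short)):
--             if long[i+j] == short[j]:
--                 score += 1
--         if score > highest_score:
--             highest_score = score
--             best_match = long[i: i+len(short)]
--         score = 0
--     return best_match
-- ===== SOURCE B (Python) =====
-- def match_process(long, short):
--     # Sparse cross-correlation: index short's positions per character, then one
--     # pass over long bumps a per-alignment match counter.  A sliding start
--     # pointer per character plus the sortedness of each position list keeps the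
--     # inner walk inside the valid alignment window [i-(n-m), i], so total work
--     # is O(n + m + window matches).  Finally take the first alignment with the
--     # maximal positive count.
--     n, m = len(long), len(short)
--     w = n - m
--     pos = {}
--     for j, c in enumerate(short):
--         pos.setdefault(c, []).append(j)
--     counts = [0] * (w + 1)
--     start = {}
--     for i, c in enumerate(long):
--         js = pos.get(c, [])
--         q = start.get(c, 0)
--         while q < len(js) and js[q] < i - w:
--             q += 1
--         start[c] = q
--         while q < len(js) and js[q] <= i:
--             counts[i - js[q]] += 1
--             q += 1
--     best_score, best_k = 0, -1
--     for k, s in enumerate(counts):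
--         if s > best_score:
--             best_score, best_k = s, k
--     return long[best_k:best_k + m] if best_k >= 0 else ''
-- ===== Notes on version B (the rewrite author's own statement) =====
-- stated objective: alternative
-- what changed: Replaces A's per-window rescan with a sparse cross-correlation: B indexes short's positions per character, then one pass over long bumps a per-alignment match counter for each single-character match (a sliding start pointer per character keeps the walk inside the valid alignment window), and a final scan picks the first alignment with maximal positive count.
import Mathlib
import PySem

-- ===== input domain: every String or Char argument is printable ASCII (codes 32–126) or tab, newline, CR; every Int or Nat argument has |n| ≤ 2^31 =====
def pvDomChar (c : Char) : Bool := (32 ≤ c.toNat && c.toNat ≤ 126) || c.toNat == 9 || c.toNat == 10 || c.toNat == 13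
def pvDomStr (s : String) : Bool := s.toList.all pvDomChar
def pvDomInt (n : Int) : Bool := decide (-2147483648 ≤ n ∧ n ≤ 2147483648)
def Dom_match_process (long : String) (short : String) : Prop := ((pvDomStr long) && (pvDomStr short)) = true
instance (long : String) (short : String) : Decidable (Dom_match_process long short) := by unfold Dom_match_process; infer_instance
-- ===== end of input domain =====

-- B replaces A's per-window rescan with a sparse cross-correlation (per-character position
-- lists of short drive one pass over long that bumps a per-alignment match counter), then
-- picks the first alignment with maximal positive count.

-- ===== PORT A =====
-- indices i+j and j are always in range of long/short, so comparing the two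
-- pyGet? options equals Python's char comparison there
def match_process (long : String) (short : String) : String :=
  let lo := long.toList
  let sh := short.toList
  let r := (PySem.List.pyRange 0 ((lo.length : Int) - (sh.length : Int) + 1) 1).foldl
    (fun (st : Int × Int × List Char) i =>
      let score := (PySem.List.pyRange 0 ((sh.length : Int)) 1).foldl
        (fun sc j => if PySem.List.pyGet? lo (i + j) == PySem.List.pyGet? sh j then sc + 1 else sc)
        st.2.1
      if score > st.1 then (score, 0, PySem.List.slice lo (some i) (some (i + (sh.length : Int))))
      else (st.1, 0, st.2.2))
    ((0 : Int), (0 : Int), ([] : List Char))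
  String.ofList r.2.2

-- ===== PORT B =====
-- 'while q < len(js) and js[q] < i - w: q += 1'  (q is a nonnegative index)
def mpSkip (js : List Int) (b : Int) (q : Nat) : Nat :=
  if h : q < js.length ∧ js.getD q 0 < b then mpSkip js b (q + 1) else q
termination_by js.length - q
decreasing_by omega

-- 'while q < len(js) and js[q] <= i: counts[i - js[q]] += 1; q += 1'
-- counts[k] += 1 is ported as set k (getD k 0 + 1); on reachable states k is in range
def mpBump (js : List Int) (i : Int) (cs : List Int) (q : Nat) : List Int :=
  if h : q < js.length ∧ js.getD q 0 ≤ i then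
    mpBump js i (cs.set (i - js.getD q 0).toNat (cs.getD (i - js.getD q 0).toNat 0 + 1)) (q + 1)
  else cs
termination_by js.length - q
decreasing_by omega

def match_process_alt (long : String) (short : String) : String :=
  let lo := long.toList
  let sh := short.toList
  let n := lo.length
  let m := sh.length
  let w : Int := (n : Int) - (m : Int)
  -- pos.setdefault(c, []).append(j): append j to the list stored at c
  let pos := (PySem.List.enumerate sh 0).foldl
      (fun (d : PySem.Dict Char (List Int)) jc =>
        d.insert jc.2 (d.getD jc.2 [] ++ [jc.1])) PySem.Dict.empty
  let st := (PySem.List.enumerate lo 0).foldl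
      (fun (st : List Int × PySem.Dict Char Nat) ic =>
        let js := pos.getD ic.2 []
        let q1 := mpSkip js (ic.1 - w) (st.2.getD ic.2 0)
        (mpBump js ic.1 st.1 q1, st.2.insert ic.2 q1))
      (List.replicate (w + 1).toNat (0 : Int), PySem.Dict.empty)
  let counts := st.1
  let r := (PySem.List.enumerate counts 0).foldl
      (fun (p : Int × Int) ks => if ks.2 > p.1 then (ks.2, ks.1) else p)
      ((0 : Int), (-1 : Int))
  if 0 ≤ r.2 then String.ofList (PySem.List.slice lo (some r.2) (some (r.2 + (m : Int))))
  else String.ofList []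

-- ===== PRECONDITION & SPEC =====
def Spec_match_process (long : String) (short : String) (out : String) : Prop := out = match_process_alt long short
instance (long : String) (short : String) (out : String) : Decidable (Spec_match_process long short out) := by unfold Spec_match_process; infer_instance

-- ===== CLAIM (what is proved, stated in full; the proofs are below) =====
def Claim_equal_match_process : Prop := ∀ (long : String) (short : String), Dom_match_process long short → Spec_match_process long short (match_process long short)

-- ===== LEMMAS AND PROOFS =====
-- the score of window k, shared reference point of both sides
def mpScore (sh : List Char) (w : List Char) : Int :=
  ((w.zip sh).map (fun p => if p.1 == p.2 then (1 : Int) else 0)).sum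

theorem mpScore_eq_countP (sh w : List Char) :
    mpScore sh w = ((w.zip sh).countP (fun p => p.1 == p.2) : Int) :=
  PySem.List.sum_map_ite_one_zero _ _

theorem zip_take_length (xs ys : List Char) : (xs.take ys.length).zip ys = xs.zip ys := by
  induction ys generalizing xs with
  | nil => simp
  | cons y yt ih =>
    cases xs with
    | nil => simp
    | cons x xt => simp [List.take_succ_cons, List.zip_cons_cons, ih]

theorem countP_range_zip (sh ys : List Char) (h : sh.length ≤ ys.length) :
    (List.range sh.length).countP (fun k => ys[k]? == sh[k]?)
      = (ys.zip sh).countP (fun p => p.1 == p.2) := by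
  induction sh generalizing ys with
  | nil => simp
  | cons s st ih =>
    cases ys with
    | nil => simp at h
    | cons y yt =>
      have h' : st.length ≤ yt.length := by simpa using h
      simp only [List.length_cons]
      rw [List.range_succ_eq_map]
      rw [List.countP_cons, List.countP_map]
      simp only [List.getElem?_cons_zero, List.getElem?_cons_succ, Function.comp_def]
      rw [ih yt h', List.zip_cons_cons, List.countP_cons]
      simp

-- A's inner counting loop over j equals the zip score of the corresponding window
theorem inner_score_eq (lo sh : List Char) (i c : Int) (h0 : 0 ≤ i)
    (h : i.toNat + sh.length ≤ lo.length) :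
    (PySem.List.pyRange 0 ((sh.length : Int)) 1).foldl
        (fun sc j => if PySem.List.pyGet? lo (i + j) == PySem.List.pyGet? sh j then sc + 1 else sc) c
      = c + mpScore sh (PySem.List.slice lo (some i) (some (i + (sh.length : Int)))) := by
  obtain ⟨a, rfl⟩ : ∃ a : Nat, i = (a : Int) := ⟨i.toNat, (Int.toNat_of_nonneg h0).symm⟩
  rw [PySem.List.slice_natCast_add, PySem.List.pyRange_zero_nat]
  rw [List.foldl_map, PySem.List.foldl_if_add_one
    (fun k : Nat => PySem.List.pyGet? lo ((a : Int) + (k : Int)) == PySem.List.pyGet? sh (k : Int))]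
  congr 1
  have hcast : ∀ k : Nat, (a : Int) + (k : Int) = ((a + k : Nat) : Int) := by intro k; push_cast; ring
  have hpred : ∀ k : Nat,
      (PySem.List.pyGet? lo ((a : Int) + (k : Int)) == PySem.List.pyGet? sh (k : Int))
        = ((lo.drop a)[k]? == sh[k]?) := by
    intro k
    rw [hcast k, PySem.List.pyGet?_natCast, PySem.List.pyGet?_natCast, List.getElem?_drop]
  rw [List.countP_congr (fun k _ => by rw [hpred k])]
  rw [mpScore_eq_countP, zip_take_length]
  rw [countP_range_zip sh (lo.drop a) (by simp; omega)]

-- A's triple state with per-iteration score reset = pair state (score, window)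
theorem triple_fold_eq_pair (l : List Int) (f : Int → Int) (g : Int → List Char) :
    ∀ (hs : Int) (b : List Char),
      l.foldl (fun (st : Int × Int × List Char) i =>
          if st.2.1 + f i > st.1 then (st.2.1 + f i, (0 : Int), g i) else (st.1, 0, st.2.2))
        (hs, 0, b)
      = ((l.foldl (fun (p : Int × List Char) i => if f i > p.1 then (f i, g i) else p) (hs, b)).1,
          0,
          (l.foldl (fun (p : Int × List Char) i => if f i > p.1 then (f i, g i) else p) (hs, b)).2) := by
  induction l with
  | nil => intro hs b; simp
  | cons i t ih =>
    intro hs b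
    simp only [List.foldl_cons, zero_add, gt_iff_lt]
    by_cases h : hs < f i
    · simp only [h, if_pos]; exact ih (f i) (g i)
    · simp only [h, if_neg, not_false_iff]; exact ih hs b
theorem dict_cnt (sh : List Char) : ∀ (s : Int) (d : PySem.Dict Char (List Int)) (c : Char) (x : Int),
    (((PySem.List.enumerate sh s).foldl
        (fun (d : PySem.Dict Char (List Int)) jc => d.insert jc.2 (d.getD jc.2 [] ++ [jc.1])) d).getD c []).countP
        (fun j => j = x)
      = ((d.getD c []).countP (fun j => j = x))
        + (if s ≤ x ∧ x < s + sh.length ∧ sh[(x - s).toNat]? = some c then 1 else 0) := by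
  induction sh with
  | nil =>
    intro s d c x
    rw [PySem.List.enumerate_nil, List.foldl_nil,
      if_neg (by simp only [List.length_nil, Nat.cast_zero]; omega)]
    omega
  | cons y sh' ih =>
    intro s d c x
    have hcond : (s ≤ x ∧ x < s + ((y :: sh').length : Int) ∧ (y :: sh')[(x - s).toNat]? = some c)
        ↔ ((x = s ∧ y = c) ∨ (s + 1 ≤ x ∧ x < (s + 1) + (sh'.length : Int) ∧ sh'[(x - (s + 1)).toNat]? = some c)) := by
      simp only [List.length_cons, Nat.cast_add, Nat.cast_one]
      constructor
      · rintro ⟨h1, h2, h3⟩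
        by_cases hx : x = s
        · subst hx
          rw [show (x - x).toNat = 0 by omega, List.getElem?_cons_zero] at h3
          exact Or.inl ⟨rfl, Option.some.inj h3⟩
        · rw [show (x - s).toNat = (x - (s + 1)).toNat + 1 by omega, List.getElem?_cons_succ] at h3
          exact Or.inr ⟨by omega, by omega, h3⟩
      · rintro (⟨hx, hy⟩ | ⟨h1, h2, h3⟩)
        · subst hx; subst hy
          refine ⟨le_refl _, by omega, ?_⟩
          rw [show (x - x).toNat = 0 by omega, List.getElem?_cons_zero]
        · refine ⟨by omega, by omega, ?_⟩
          rw [show (x - s).toNat = (x - (s + 1)).toNat + 1 by omega, List.getElem?_cons_succ]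
          exact h3
    rw [PySem.List.enumerate_cons, List.foldl_cons]
    dsimp only
    rw [ih, PySem.Dict.getD_insert, if_congr hcond rfl rfl]
    by_cases hcy : c = y
    · subst hcy
      rw [if_pos rfl, List.countP_append, List.countP_singleton]
      by_cases hx : x = s
      · have hns : ¬ (s + 1 ≤ x ∧ x < s + 1 + (sh'.length : Int) ∧ sh'[(x - (s + 1)).toNat]? = some c) := by
          rintro ⟨h1, _, _⟩; omega
        rw [if_neg hns, if_pos (Or.inl ⟨hx, rfl⟩)]
        simp [hx]
      · have hiff : ((x = s ∧ c = c) ∨ (s + 1 ≤ x ∧ x < (s + 1) + (sh'.length : Int) ∧ sh'[(x - (s + 1)).toNat]? = some c))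
            ↔ (s + 1 ≤ x ∧ x < (s + 1) + (sh'.length : Int) ∧ sh'[(x - (s + 1)).toNat]? = some c) :=
          ⟨fun h => h.resolve_left (fun hh => hx hh.1), Or.inr⟩
        rw [if_congr hiff rfl rfl]
        have : (decide ((s : Int) = x)) = false := by simp; omega
        rw [this]
        simp
    · rw [if_neg hcy]
      have hiff : ((x = s ∧ y = c) ∨ (s + 1 ≤ x ∧ x < (s + 1) + (sh'.length : Int) ∧ sh'[(x - (s + 1)).toNat]? = some c))
          ↔ (s + 1 ≤ x ∧ x < (s + 1) + (sh'.length : Int) ∧ sh'[(x - (s + 1)).toNat]? = some c) :=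
        ⟨fun h => h.resolve_left (fun hh => hcy hh.2.symm), Or.inr⟩
      rw [if_congr hiff rfl rfl]
theorem sumMid (lo : List Char) : ∀ (sh : List Char) (t : Int),
    ((PySem.List.enumerate lo t).map (fun ic =>
        if 0 ≤ ic.1 - t ∧ ic.1 - t < (sh.length : Int) ∧ sh[(ic.1 - t).toNat]? = some ic.2 then (1 : Int) else 0)).sum
      = ((lo.zip sh).countP (fun p => p.1 == p.2) : Int) := by
  induction lo with
  | nil => intro sh t; simp [PySem.List.enumerate_nil]
  | cons x lo' ih =>
    intro sh t
    rw [PySem.List.enumerate_cons, List.map_cons, List.sum_cons]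
    cases sh with
    | nil =>
      simp only [List.length_nil, Nat.cast_zero, List.zip_nil_right, List.countP_nil, Nat.cast_zero]
      rw [if_neg (by rintro ⟨h1, h2, _⟩; omega)]
      have hz : ∀ ic : Int × Char,
          (if 0 ≤ ic.1 - t ∧ ic.1 - t < (0 : Int) ∧ ([] : List Char)[(ic.1 - t).toNat]? = some ic.2 then (1 : Int) else 0) = 0 :=
        fun ic => if_neg (by rintro ⟨h1, h2, _⟩; omega)
      rw [List.map_congr_left (fun ic _ => hz ic)]
      simp
    | cons y sh' =>
      have hhead : (if 0 ≤ t - t ∧ t - t < ((y :: sh').length : Int) ∧ (y :: sh')[(t - t).toNat]? = some x then (1 : Int) else 0)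
          = if x == y then (1 : Int) else 0 := by
        rw [show (t - t).toNat = 0 by omega, List.getElem?_cons_zero]
        by_cases hxy : x = y
        · rw [if_pos ⟨by omega, by simp only [List.length_cons]; push_cast; omega, by rw [hxy]⟩]
          simp [hxy]
        · rw [if_neg (by rintro ⟨_, _, h⟩; exact hxy (Option.some.inj h).symm)]
          simp [hxy]
      have htail : ∀ ic ∈ PySem.List.enumerate lo' (t + 1),
          (if 0 ≤ ic.1 - t ∧ ic.1 - t < ((y :: sh').length : Int) ∧ (y :: sh')[(ic.1 - t).toNat]? = some ic.2 then (1 : Int) else 0)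
            = (if 0 ≤ ic.1 - (t + 1) ∧ ic.1 - (t + 1) < (sh'.length : Int) ∧ sh'[(ic.1 - (t + 1)).toNat]? = some ic.2 then (1 : Int) else 0) := by
        intro ic hic
        obtain ⟨k, hk, rfl⟩ := (PySem.List.mem_enumerate_iff _ _ _).mp hic
        have hge : t + 1 ≤ t + 1 + (k : Int) := by omega
        have hstep : ((t + 1 + (k : Int)) - t).toNat = ((t + 1 + (k : Int)) - (t + 1)).toNat + 1 := by omega
        by_cases hc : 0 ≤ (t + 1 + (k : Int)) - (t + 1) ∧ (t + 1 + (k : Int)) - (t + 1) < (sh'.length : Int) ∧ sh'[((t + 1 + (k : Int)) - (t + 1)).toNat]? = some lo'[k]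
        · rw [if_pos hc, if_pos ⟨by omega, by simp only [List.length_cons]; push_cast; omega, by rw [hstep, List.getElem?_cons_succ]; exact hc.2.2⟩]
        · rw [if_neg hc]
          rw [if_neg (by rintro ⟨h1, h2, h3⟩; rw [hstep, List.getElem?_cons_succ] at h3; exact hc ⟨by omega, by simp only [List.length_cons] at h2; push_cast at h2; omega, h3⟩)]
      rw [hhead, List.map_congr_left htail, ih sh' (t + 1), List.zip_cons_cons, List.countP_cons]
      by_cases hxy : x = y
      all_goals simp [hxy]
      all_goals omega
theorem mpSkip_le_len (js : List Int) (b : Int) (q : Nat) (hq : q ≤ js.length) : mpSkip js b q ≤ js.length := by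
  fun_induction mpSkip js b q with
  | case1 q h ih => exact ih (by omega)
  | case2 q h => exact hq

theorem mpSkip_new (js : List Int) (b : Int) (q : Nat) :
    ∀ idx, q ≤ idx → idx < mpSkip js b q → js.getD idx 0 < b := by
  fun_induction mpSkip js b q with
  | case1 q h ih =>
    intro idx h1 h2
    by_cases he : idx = q
    · subst he; exact h.2
    · exact ih idx (by omega) h2
  | case2 q h => intro idx h1 h2; omega

theorem mpBump_len (js : List Int) (i : Int) (cs : List Int) (q : Nat) :
    (mpBump js i cs q).length = cs.length := by
  fun_induction mpBump js i cs q with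
  | case1 cs q h ih => rw [ih, List.length_set]
  | case2 cs q h => rfl

theorem mpBump_val (js : List Int) (i : Int) (cs : List Int) (q : Nat) :
    (js.drop q).Pairwise (· ≤ ·) → ∀ t : Nat, t < cs.length →
      (mpBump js i cs q).getD t 0
        = cs.getD t 0 + (((js.drop q).countP (fun j => i - j = (t : Int))) : Int) := by
  fun_induction mpBump js i cs q with
  | case1 cs q h ih =>
    intro hsort t ht
    have hq : q < js.length := h.1
    have hdrop : js.drop q = js.getD q 0 :: js.drop (q + 1) := by
      rw [List.getD_eq_getElem _ _ hq]
      exact List.drop_eq_getElem_cons hq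
    rw [hdrop] at hsort ⊢
    rw [List.countP_cons]
    have hsort' : (js.drop (q + 1)).Pairwise (· ≤ ·) := hsort.of_cons
    have ht' : t < (cs.set (i - js.getD q 0).toNat (cs.getD (i - js.getD q 0).toNat 0 + 1)).length := by
      rw [List.length_set]; exact ht
    rw [ih hsort' t ht']
    by_cases hk : (i - js.getD q 0) = (t : Int)
    · have hkt : (i - js.getD q 0).toNat = t := by omega
      have : (cs.set (i - js.getD q 0).toNat (cs.getD (i - js.getD q 0).toNat 0 + 1)).getD t 0
          = cs.getD t 0 + 1 := by
        rw [hkt, List.getD_eq_getElem?_getD, List.getElem?_set, if_pos rfl, if_pos ht]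
        rw [List.getD_eq_getElem?_getD]
        simp
      rw [this, decide_eq_true hk]
      simp only [if_pos]
      push_cast
      ring
    · have hvle : js.getD q 0 ≤ i := h.2
      have hk0 : (0 : Int) ≤ i - js.getD q 0 := by omega
      have hkt : (i - js.getD q 0).toNat ≠ t := by
        intro he
        apply hk
        omega
      have : (cs.set (i - js.getD q 0).toNat (cs.getD (i - js.getD q 0).toNat 0 + 1)).getD t 0
          = cs.getD t 0 := by
        rw [List.getD_eq_getElem?_getD, List.getElem?_set, if_neg hkt, ← List.getD_eq_getElem?_getD]
      rw [this, decide_eq_false hk]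
      simp only [Bool.false_eq_true, if_false, Nat.add_zero]
  | case2 cs q h =>
    intro hsort t ht
    by_cases hq : q < js.length
    · have hvi : ¬ js.getD q 0 ≤ i := by
        intro hle; exact h ⟨hq, hle⟩
      have hdrop : js.drop q = js.getD q 0 :: js.drop (q + 1) := by
        rw [List.getD_eq_getElem _ _ hq]
        exact List.drop_eq_getElem_cons hq
      rw [hdrop] at hsort ⊢
      have hz : (js.getD q 0 :: js.drop (q + 1)).countP (fun j => decide (i - j = (t : Int))) = 0 := by
        rw [List.countP_eq_zero]
        intro a ha
        have hge : js.getD q 0 ≤ a := by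
          rcases List.mem_cons.mp ha with rfl | hmem
          · exact le_refl _
          · exact (List.pairwise_cons.mp hsort).1 a hmem
        simp only [decide_eq_true_eq]
        omega
      rw [hz]
      simp
    · have hdrop : js.drop q = [] := List.drop_eq_nil_of_le (by omega)
      rw [hdrop]
      simp

theorem dict_sorted (sh : List Char) : ∀ (s : Int) (d : PySem.Dict Char (List Int)),
    (∀ c, ((d.getD c []).Pairwise (· < ·)) ∧ (∀ x ∈ d.getD c [], x < s)) →
    ∀ c, ((((PySem.List.enumerate sh s).foldl
        (fun (d : PySem.Dict Char (List Int)) jc => d.insert jc.2 (d.getD jc.2 [] ++ [jc.1])) d).getD c []).Pairwise (· < ·)) := by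
  induction sh with
  | nil =>
    intro s d hd c
    rw [PySem.List.enumerate_nil, List.foldl_nil]
    exact (hd c).1
  | cons y sh' ih =>
    intro s d hd c
    rw [PySem.List.enumerate_cons, List.foldl_cons]
    dsimp only
    apply ih (s + 1)
    intro c'
    rw [PySem.Dict.getD_insert]
    by_cases hc : c' = y
    · rw [if_pos hc]
      constructor
      · apply List.pairwise_append.mpr
        refine ⟨(hd y).1, List.pairwise_singleton _ _, ?_⟩
        intro a ha b hb
        rw [List.mem_singleton] at hb
        subst hb
        exact (hd y).2 a ha
      · intro x hx
        rcases List.mem_append.mp hx with hx | hx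
        · have := (hd y).2 x hx; omega
        · rw [List.mem_singleton] at hx; subst hx; omega
    · rw [if_neg hc]
      constructor
      · exact (hd c').1
      · intro x hx
        have := (hd c').2 x hx; omega

theorem outer2_len (P : Char → List Int) (w : Int) (lo : List Char) :
    ∀ (s : Int) (cs : List Int) (sd : PySem.Dict Char Nat),
      ((PySem.List.enumerate lo s).foldl
          (fun (st : List Int × PySem.Dict Char Nat) ic =>
            (mpBump (P ic.2) ic.1 st.1 (mpSkip (P ic.2) (ic.1 - w) (st.2.getD ic.2 0)),
              st.2.insert ic.2 (mpSkip (P ic.2) (ic.1 - w) (st.2.getD ic.2 0)))) (cs, sd)).1.length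
        = cs.length := by
  induction lo with
  | nil => intro s cs sd; rfl
  | cons x lo' ih =>
    intro s cs sd
    rw [PySem.List.enumerate_cons, List.foldl_cons]
    dsimp only
    rw [ih, mpBump_len]

theorem outer2_val (P : Char → List Int) (w : Int) (lo : List Char)
    (hP : ∀ c, (P c).Pairwise (· < ·)) :
    ∀ (s : Int) (cs : List Int) (sd : PySem.Dict Char Nat),
      (∀ c, sd.getD c 0 ≤ (P c).length) →
      (∀ c idx, idx < sd.getD c 0 → (P c).getD idx 0 < s - w) →
      ∀ t : Nat, t < cs.length → (t : Int) ≤ w →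
      ((PySem.List.enumerate lo s).foldl
          (fun (st : List Int × PySem.Dict Char Nat) ic =>
            (mpBump (P ic.2) ic.1 st.1 (mpSkip (P ic.2) (ic.1 - w) (st.2.getD ic.2 0)),
              st.2.insert ic.2 (mpSkip (P ic.2) (ic.1 - w) (st.2.getD ic.2 0)))) (cs, sd)).1.getD t 0
        = cs.getD t 0
          + ((PySem.List.enumerate lo s).map
              (fun ic => ((P ic.2).countP (fun j => ic.1 - j = (t : Int)) : Int))).sum := by
  induction lo with
  | nil => intro s cs sd _ _ t ht htw; simp [PySem.List.enumerate_nil]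
  | cons x lo' ih =>
    intro s cs sd hlen hpre t ht htw
    rw [PySem.List.enumerate_cons, List.foldl_cons, List.map_cons, List.sum_cons]
    dsimp only
    have hq0 : sd.getD x 0 ≤ (P x).length := hlen x
    have hq1le : mpSkip (P x) (s - w) (sd.getD x 0) ≤ (P x).length := mpSkip_le_len _ _ _ hq0
    have hq1pre : ∀ idx, idx < mpSkip (P x) (s - w) (sd.getD x 0) → (P x).getD idx 0 < s - w := by
      intro idx hidx
      by_cases hlt : idx < sd.getD x 0
      · exact hpre x idx hlt
      · exact mpSkip_new (P x) (s - w) (sd.getD x 0) idx (by omega) hidx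
    -- sortedness of the tail we bump over
    have hsortP : (P x).Pairwise (· < ·) := hP x
    have hsdrop : ((P x).drop (mpSkip (P x) (s - w) (sd.getD x 0))).Pairwise (· ≤ ·) :=
      (List.Pairwise.drop hsortP).imp le_of_lt
    -- new state invariants
    have hlen' : ∀ c, (sd.insert x (mpSkip (P x) (s - w) (sd.getD x 0))).getD c 0 ≤ (P c).length := by
      intro c
      rw [PySem.Dict.getD_insert]
      by_cases hc : c = x
      · rw [if_pos hc, hc]; exact hq1le
      · rw [if_neg hc]; exact hlen c
    have hpre' : ∀ c idx, idx < (sd.insert x (mpSkip (P x) (s - w) (sd.getD x 0))).getD c 0 →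
        (P c).getD idx 0 < (s + 1) - w := by
      intro c idx hidx
      rw [PySem.Dict.getD_insert] at hidx
      by_cases hc : c = x
      · rw [if_pos hc] at hidx
        subst hc
        have := hq1pre idx hidx; omega
      · rw [if_neg hc] at hidx
        have := hpre c idx hidx; omega
    rw [ih (s + 1) _ _ hlen' hpre' t (by rw [mpBump_len]; exact ht) htw]
    rw [mpBump_val (P x) s _ _ hsdrop t ht]
    -- whole-list count = skipped prefix (all < s - w, counts 0) + suffix
    have hsplit : (P x).countP (fun j => s - j = (t : Int))
        = ((P x).drop (mpSkip (P x) (s - w) (sd.getD x 0))).countP (fun j => s - j = (t : Int)) := by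
      conv_lhs => rw [← List.take_append_drop (mpSkip (P x) (s - w) (sd.getD x 0)) (P x)]
      rw [List.countP_append]
      have hz : ((P x).take (mpSkip (P x) (s - w) (sd.getD x 0))).countP (fun j => s - j = (t : Int)) = 0 := by
        rw [List.countP_eq_zero]
        intro a ha
        rw [List.mem_iff_getElem] at ha
        obtain ⟨idx, hidx, rfl⟩ := ha
        rw [List.getElem_take] at *
        have hidx' : idx < mpSkip (P x) (s - w) (sd.getD x 0) := by
          rw [List.length_take] at hidx; omega
        have hb : (P x).getD idx 0 < s - w := hq1pre idx hidx'
        rw [List.getD_eq_getElem _ _ (by rw [List.length_take] at hidx; omega)] at hb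
        simp only [decide_eq_true_eq]
        omega
      rw [hz, Nat.zero_add]
    rw [← hsplit]
    ring

theorem pyRange_zero_toNat (X : Int) :
    PySem.List.pyRange 0 X 1 = PySem.List.pyRange 0 ((X.toNat : Int)) 1 := by
  rw [PySem.List.pyRange_one, PySem.List.pyRange_one]
  congr 2
  omega
-- the running first-strict-max folds of A (carrying windows) and B (carrying indices) stay in step
theorem pairfold_rel (f : Int → Int) (g : Int → List Char) (l : List Int) (hpos : ∀ i ∈ l, 0 ≤ i) :
    ∀ (s : Int) (w : List Char) (k : Int), ((k = -1 ∧ w = []) ∨ (0 ≤ k ∧ w = g k)) →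
      (l.foldl (fun (p : Int × List Char) i => if f i > p.1 then (f i, g i) else p) (s, w)).1
          = (l.foldl (fun (p : Int × Int) i => if f i > p.1 then (f i, i) else p) (s, k)).1
        ∧ (((l.foldl (fun (p : Int × Int) i => if f i > p.1 then (f i, i) else p) (s, k)).2 = -1
              ∧ (l.foldl (fun (p : Int × List Char) i => if f i > p.1 then (f i, g i) else p) (s, w)).2 = [])
            ∨ (0 ≤ (l.foldl (fun (p : Int × Int) i => if f i > p.1 then (f i, i) else p) (s, k)).2
              ∧ (l.foldl (fun (p : Int × List Char) i => if f i > p.1 then (f i, g i) else p) (s, w)).2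
                  = g (l.foldl (fun (p : Int × Int) i => if f i > p.1 then (f i, i) else p) (s, k)).2)) := by
  induction l with
  | nil =>
    intro s w k hk
    rcases hk with ⟨hk, hw⟩ | ⟨hk, hw⟩
    · exact ⟨rfl, Or.inl ⟨hk, hw⟩⟩
    · exact ⟨rfl, Or.inr ⟨hk, hw⟩⟩
  | cons i l' ih =>
    intro s w k hk
    have hi : 0 ≤ i := hpos i List.mem_cons_self
    have hpos' : ∀ j ∈ l', 0 ≤ j := fun j hj => hpos j (List.mem_cons_of_mem _ hj)
    rw [List.foldl_cons, List.foldl_cons]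
    by_cases h : f i > s
    · rw [if_pos h, if_pos h]
      exact ih hpos' (f i) (g i) i (Or.inr ⟨hi, rfl⟩)
    · rw [if_neg h, if_neg h]
      exact ih hpos' s w k hk

-- ===== VERDICT (by name: the statement is the Claim_ definition above) =====
theorem match_process_spec : Claim_equal_match_process := by
  intro long short _
  unfold Spec_match_process
  dsimp only [match_process, match_process_alt]
  generalize long.toList = lo
  generalize short.toList = sh
  -- A side: the inner counting loop is the window score
  have hcongr :
      (PySem.List.pyRange 0 ((lo.length : Int) - (sh.length : Int) + 1) 1).foldl
        (fun (st : Int × Int × List Char) i =>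
          if (PySem.List.pyRange 0 ((sh.length : Int)) 1).foldl
              (fun sc j => if PySem.List.pyGet? lo (i + j) == PySem.List.pyGet? sh j then sc + 1 else sc)
              st.2.1 > st.1 then
            ((PySem.List.pyRange 0 ((sh.length : Int)) 1).foldl
              (fun sc j => if PySem.List.pyGet? lo (i + j) == PySem.List.pyGet? sh j then sc + 1 else sc)
              st.2.1, 0, PySem.List.slice lo (some i) (some (i + (sh.length : Int))))
          else (st.1, 0, st.2.2))
        ((0 : Int), (0 : Int), ([] : List Char))
      = (PySem.List.pyRange 0 ((lo.length : Int) - (sh.length : Int) + 1) 1).foldl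
        (fun (st : Int × Int × List Char) i =>
          if st.2.1 + mpScore sh (PySem.List.slice lo (some i) (some (i + (sh.length : Int)))) > st.1 then
            (st.2.1 + mpScore sh (PySem.List.slice lo (some i) (some (i + (sh.length : Int)))), (0 : Int),
              PySem.List.slice lo (some i) (some (i + (sh.length : Int))))
          else (st.1, 0, st.2.2))
        ((0 : Int), (0 : Int), ([] : List Char)) := by
    apply PySem.List.foldl_congr_mem
    intro st i hi
    have hmem := (PySem.List.mem_pyRange_one).mp hi
    have h0 : 0 ≤ i := hmem.1
    have hub : i.toNat + sh.length ≤ lo.length := by omega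
    rw [inner_score_eq lo sh i st.2.1 h0 hub]
  rw [hcongr,
    triple_fold_eq_pair (PySem.List.pyRange 0 ((lo.length : Int) - (sh.length : Int) + 1) 1)
      (fun i => mpScore sh (PySem.List.slice lo (some i) (some (i + (sh.length : Int)))))
      (fun i => PySem.List.slice lo (some i) (some (i + (sh.length : Int)))) 0 []]
  dsimp only
  -- name the B-side data
  set psh := (PySem.List.enumerate sh 0).foldl
      (fun (d : PySem.Dict Char (List Int)) jc => d.insert jc.2 (d.getD jc.2 [] ++ [jc.1]))
      PySem.Dict.empty with hpsh
  set fullst := (PySem.List.enumerate lo 0).foldl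
      (fun (st : List Int × PySem.Dict Char Nat) ic =>
        (mpBump (psh.getD ic.2 []) ic.1 st.1
            (mpSkip (psh.getD ic.2 []) (ic.1 - ((lo.length : Int) - (sh.length : Int))) (st.2.getD ic.2 0)),
          st.2.insert ic.2
            (mpSkip (psh.getD ic.2 []) (ic.1 - ((lo.length : Int) - (sh.length : Int))) (st.2.getD ic.2 0))))
      (List.replicate (((lo.length : Int) - (sh.length : Int)) + 1).toNat (0 : Int), PySem.Dict.empty)
      with hfull
  set counts := fullst.1 with hcnts
  have hsorted : ∀ c, (psh.getD c []).Pairwise (· < ·) := by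
    rw [hpsh]
    exact dict_sorted sh 0 PySem.Dict.empty
      (fun c => by rw [PySem.Dict.getD_empty]; exact ⟨List.Pairwise.nil, by simp⟩)
  have hclen : counts.length = ((lo.length : Int) - (sh.length : Int) + 1).toNat := by
    rw [hcnts, hfull]
    exact (outer2_len (fun c => psh.getD c []) ((lo.length : Int) - (sh.length : Int)) lo 0 _ _).trans
      (List.length_replicate)
  -- the counts array holds exactly the window scores
  have hcval : ∀ t : Nat, t < counts.length →
      counts.getD t 0
        = mpScore sh (PySem.List.slice lo (some (t : Int)) (some ((t : Int) + (sh.length : Int)))) := by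
    intro t ht
    have htL : (t : Int) ≤ (lo.length : Int) - (sh.length : Int) := by
      rw [hclen] at ht; omega
    have htn : t ≤ lo.length := by omega
    have h1 : counts.getD t 0
        = (List.replicate ((((lo.length : Int) - (sh.length : Int)) + 1)).toNat (0 : Int)).getD t 0
          + ((PySem.List.enumerate lo 0).map
              (fun ic => ((psh.getD ic.2 []).countP (fun j => ic.1 - j = (t : Int)) : Int))).sum := by
      rw [hcnts, hfull]
      exact outer2_val (fun c => psh.getD c []) ((lo.length : Int) - (sh.length : Int)) lo hsorted 0 _
        PySem.Dict.empty
        (fun c => by rw [PySem.Dict.getD_empty]; omega)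
        (fun c idx hidx => by rw [PySem.Dict.getD_empty] at hidx; omega)
        t (by rw [List.length_replicate, ← hclen]; exact ht) (by omega)
    rw [h1, List.getD_replicate _ (by rw [← hclen]; exact ht), zero_add]
    -- each dictionary lookup counts at most one matching position
    have hterm : ∀ ic : Int × Char,
        ((psh.getD ic.2 []).countP (fun j => ic.1 - j = (t : Int)) : Int)
          = (if 0 ≤ ic.1 - (t : Int) ∧ ic.1 - (t : Int) < (sh.length : Int)
                ∧ sh[(ic.1 - (t : Int)).toNat]? = some ic.2 then (1 : Int) else 0) := by
      intro ic
      have hpc : (psh.getD ic.2 []).countP (fun j => ic.1 - j = (t : Int))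
          = (psh.getD ic.2 []).countP (fun j => j = ic.1 - (t : Int)) :=
        List.countP_congr (fun j _ => by simp only [decide_eq_true_eq]; omega)
      rw [hpc, hpsh, dict_cnt sh 0 PySem.Dict.empty ic.2 (ic.1 - (t : Int))]
      rw [PySem.Dict.getD_empty, List.countP_nil, Nat.zero_add]
      rw [show ic.1 - (t : Int) - 0 = ic.1 - (t : Int) by omega,
        show (0 : Int) + (sh.length : Int) = (sh.length : Int) by omega]
      split_ifs with h
      · rfl
      · rfl
    rw [List.map_congr_left (fun ic _ => hterm ic)]
    -- split the scan of long at position t; the prefix contributes nothing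
    have hsplit : lo = lo.take t ++ lo.drop t := (List.take_append_drop t lo).symm
    rw [show PySem.List.enumerate lo 0
          = PySem.List.enumerate (lo.take t) 0 ++ PySem.List.enumerate (lo.drop t) (0 + (lo.take t).length) from by
        conv_lhs => rw [hsplit]
        exact PySem.List.enumerate_append _ _ _]
    rw [List.map_append, List.sum_append]
    have hfront : ∀ ic ∈ PySem.List.enumerate (lo.take t) 0,
        (if 0 ≤ ic.1 - (t : Int) ∧ ic.1 - (t : Int) < (sh.length : Int)
            ∧ sh[(ic.1 - (t : Int)).toNat]? = some ic.2 then (1 : Int) else 0) = 0 := by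
      intro ic hic
      obtain ⟨k, hk, rfl⟩ := (PySem.List.mem_enumerate_iff _ _ _).mp hic
      rw [List.length_take] at hk
      exact if_neg (by rintro ⟨h1', _, _⟩; simp only at h1'; omega)
    rw [List.map_congr_left hfront]
    simp only [List.map_const', List.sum_replicate, smul_zero, zero_add]
    rw [show (((lo.take t).length : Int)) = (t : Int) by
      rw [List.length_take]; omega]
    rw [sumMid (lo.drop t) sh (t : Int)]
    rw [PySem.List.slice_natCast_add, mpScore_eq_countP, zip_take_length]
  -- B's final scan runs over the window scores
  rw [PySem.List.enumerate_eq_map_pyRange counts 0, List.foldl_map]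
  rw [show PySem.List.len counts = (((lo.length : Int) - (sh.length : Int) + 1).toNat : Int) from by
    rw [PySem.List.len_eq, hclen]]
  have hbody : (PySem.List.pyRange 0 (((lo.length : Int) - (sh.length : Int) + 1).toNat : Int) 1).foldl
      (fun (p : Int × Int) j =>
        if (j, PySem.List.pyGetD counts j 0).2 > p.1 then ((j, PySem.List.pyGetD counts j 0).2, (j, PySem.List.pyGetD counts j 0).1) else p)
      ((0 : Int), (-1 : Int))
      = (PySem.List.pyRange 0 (((lo.length : Int) - (sh.length : Int) + 1).toNat : Int) 1).foldl
      (fun (p : Int × Int) j =>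
        if mpScore sh (PySem.List.slice lo (some j) (some (j + (sh.length : Int)))) > p.1
        then (mpScore sh (PySem.List.slice lo (some j) (some (j + (sh.length : Int)))), j) else p)
      ((0 : Int), (-1 : Int)) := by
    apply PySem.List.foldl_congr_mem
    intro p j hj
    have hmem := (PySem.List.mem_pyRange_one).mp hj
    obtain ⟨a, rfl⟩ : ∃ a : Nat, j = (a : Int) := ⟨j.toNat, (Int.toNat_of_nonneg hmem.1).symm⟩
    have ha : a < counts.length := by rw [hclen]; omega
    rw [PySem.List.pyGetD_natCast, hcval a ha]
  rw [hbody]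
  -- relate the two first-strict-max scans
  rw [pyRange_zero_toNat ((lo.length : Int) - (sh.length : Int) + 1)]
  obtain ⟨heq1, hrel⟩ := pairfold_rel
    (fun i => mpScore sh (PySem.List.slice lo (some i) (some (i + (sh.length : Int)))))
    (fun i => PySem.List.slice lo (some i) (some (i + (sh.length : Int))))
    (PySem.List.pyRange 0 ((((lo.length : Int) - (sh.length : Int) + 1).toNat : Int)) 1)
    (fun i hi => ((PySem.List.mem_pyRange_one).mp hi).1)
    0 [] (-1) (Or.inl ⟨rfl, rfl⟩)
  rcases hrel with ⟨hk, hw⟩ | ⟨hk, hw⟩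
  · rw [hw, if_neg (by rw [hk]; omega)]
  · rw [hw, if_pos hk]
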